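-- pv_equiv track=rewrite | github.com/Yuyu-Liu11037/project1 | util/embedding.py | guess_parents
-- ===== SOURCE A (Python) =====
-- from typing import List, Tuple, Dict
--
-- def guess_parents(codes: List[str]) -> List[Tuple[str, str]]:
--     S = set(codes)
--     def nearest_existing_parent(code: str):
--         # Try removing trailing chars; also try stripping decimals to block-level
--         cand = code
--         while len(cand) > 1:
--             cand = cand[:-1].rstrip(".")
--             if cand in S:
--                 return cand
--         return None
--
--     edges = []
--     for c in codes:
--         p = nearest_existing_parent(c)
--         if p is not None:
--             edges.append((p, c))
--     return edges
-- ===== SOURCE B (Python) =====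
-- def guess_parents(codes):
--     existing = set(codes)
--     edges = []
--     for c in codes:
--         parents = [p for p in (c[:i].rstrip(".") for i in range(1, len(c))) if p in existing]
--         if parents:
--             edges.append((max(parents, key=len), c))
--     return edges
-- ===== Notes on version B (the rewrite author's own statement) =====
-- stated objective: alternative
-- what changed: A searches per code with a while-loop that iteratively shrinks one candidate (drop last char, strip trailing dots) and early-returns the first hit from the set; B instead enumerates all dot-stripped prefixes of the code in one comprehension, filters them by set membership, and takes the longest by max(key=len).
import Mathlib
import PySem

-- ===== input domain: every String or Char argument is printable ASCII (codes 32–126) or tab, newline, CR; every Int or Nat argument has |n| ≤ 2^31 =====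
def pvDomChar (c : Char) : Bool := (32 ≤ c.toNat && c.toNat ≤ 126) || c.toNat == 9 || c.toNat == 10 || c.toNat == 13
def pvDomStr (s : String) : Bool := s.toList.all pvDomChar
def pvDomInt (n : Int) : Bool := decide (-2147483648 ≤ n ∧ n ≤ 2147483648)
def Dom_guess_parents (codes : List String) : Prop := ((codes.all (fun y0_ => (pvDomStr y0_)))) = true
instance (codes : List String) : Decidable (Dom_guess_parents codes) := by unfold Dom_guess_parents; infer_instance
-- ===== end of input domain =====

-- B replaces A's per-code while-loop (shrink one candidate, early-return the first hit) by a
-- comprehension of all dot-stripped prefixes, filtered by membership, taking the longest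
-- (alternative decomposition, no speed claim).

-- ===== PORT A =====
-- Python s.rstrip(".") ported by hand (PySem has no right-only strip with a chars argument):
-- drop the trailing '.' characters; exact on all strings. (Both Pythons call this builtin.)
def pvRstripDot (cs : List Char) : List Char :=
  (cs.reverse.dropWhile (fun ch => ch == '.')).reverse

theorem pvRstripDot_length_le (cs : List Char) : (pvRstripDot cs).length ≤ cs.length := by
  simpa [pvRstripDot] using (List.length_dropWhile_le (fun ch => ch == '.') cs.reverse)

-- the inner while-loop of nearest_existing_parent; state = cand (as code points)
def pvNearest (S : PySem.Set String) (cand : List Char) : Option (List Char) :=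
  if h : 1 < cand.length then
    let cand' := pvRstripDot cand.dropLast
    if PySem.Set.contains S (String.ofList cand') then some cand'
    else pvNearest S cand'
  else none
termination_by cand.length
decreasing_by
  calc (pvRstripDot cand.dropLast).length ≤ cand.dropLast.length := pvRstripDot_length_le _
    _ < cand.length := by simp [List.length_dropLast]; omega

def guess_parents (codes : List String) : List (String × String) :=
  let S : PySem.Set String := PySem.Set.ofList codes
  codes.foldl (fun edges c =>
    match pvNearest S c.toList with
    | some p => edges ++ [(String.ofList p, c)]
    | none => edges) []

-- ===== PORT B =====
def guess_parents_alt (codes : List String) : List (String × String) :=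
  let existing : PySem.Set String := PySem.Set.ofList codes
  codes.foldl (fun edges c =>
    let parents :=
      ((PySem.List.pyRange 1 (PySem.Str.len c) 1).map
        (fun i => String.ofList (pvRstripDot (PySem.List.slice c.toList none (some i))))).filter
        (fun p => PySem.Set.contains existing p)
    match PySem.List.max? parents (fun p => PySem.Str.len p) with
    | some p => edges ++ [(p, c)]
    | none => edges) []

-- ===== PRECONDITION & SPEC =====
def Spec_guess_parents (codes : List String) (out : List (String × String)) : Prop := out = guess_parents_alt codes
instance (codes : List String) (out : List (String × String)) : Decidable (Spec_guess_parents codes out) := by unfold Spec_guess_parents; infer_instance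

-- ===== CLAIM (what is proved, stated in full; the proofs are below) =====
def Claim_equal_guess_parents : Prop := ∀ (codes : List String), Dom_guess_parents codes → Spec_guess_parents codes (guess_parents codes)

-- ===== LEMMAS AND PROOFS =====

-- okL sl cl: sl is a value A's loop on cl can test for membership, i.e. sl = strip(cl[:i]) for some 1 ≤ i ≤ |cl|-1
def okL (sl cl : List Char) : Prop :=
  sl <+: cl ∧ sl.length < cl.length ∧ sl.getLast? ≠ some '.' ∧
    (sl = [] → 1 < cl.length ∧ cl.head? = some '.')

theorem str_len_eq (t : String) : PySem.Str.len t = t.toList.length := by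
  simp [PySem.Str.len_eq]

-- candidates of equal length coincide
theorem okL_unique {s t cl : List Char} (hs : okL s cl) (ht : okL t cl)
    (h : s.length = t.length) : s = t := by
  rw [List.prefix_iff_eq_take.mp hs.1, List.prefix_iff_eq_take.mp ht.1, h]

-- rstrip facts
theorem pvRstripDot_spec (cs : List Char) :
    ∃ k, cs = pvRstripDot cs ++ List.replicate k '.' := by
  refine ⟨(cs.reverse.takeWhile (fun ch => ch == '.')).length, ?_⟩
  have htw : cs.reverse.takeWhile (fun ch => ch == '.')
      = List.replicate (cs.reverse.takeWhile (fun ch => ch == '.')).length '.' := by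
    rw [List.eq_replicate_iff]
    exact ⟨rfl, fun b hb => by simpa using List.mem_takeWhile_imp hb⟩
  calc cs = cs.reverse.reverse := by simp
    _ = (cs.reverse.takeWhile (fun ch => ch == '.') ++ cs.reverse.dropWhile (fun ch => ch == '.')).reverse := by
        rw [List.takeWhile_append_dropWhile]
    _ = pvRstripDot cs ++ List.replicate (cs.reverse.takeWhile (fun ch => ch == '.')).length '.' := by
        rw [List.reverse_append, pvRstripDot]
        congr 1
        rw [htw]
        simp

theorem head?_dropWhile_not {p : Char → Bool} {l : List Char} {x : Char}
    (h : (l.dropWhile p).head? = some x) : p x = false := by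
  induction l with
  | nil => simp at h
  | cons a t ih =>
    by_cases hp : p a
    · simp [hp] at h; exact ih h
    · simp [hp] at h; subst h; simpa using hp

theorem pvRstripDot_getLast? (cs : List Char) : (pvRstripDot cs).getLast? ≠ some '.' := by
  intro h
  rw [pvRstripDot, List.getLast?_reverse] at h
  simpa using head?_dropWhile_not h

theorem pvRstripDot_eq_self {cs : List Char} (h : cs.getLast? ≠ some '.') :
    pvRstripDot cs = cs := by
  rw [pvRstripDot]
  cases hr : cs.reverse with
  | nil => simpa using congrArg List.reverse hr
  | cons a t =>
    have ha : ¬ (a == '.') = true := by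
      intro hd
      apply h
      rw [← List.head?_reverse, hr]
      simpa using hd
    rw [List.dropWhile_cons, if_neg ha, ← hr]
    simp

theorem head?_take_pos (l : List Char) (n : Nat) (h : 0 < n) : (l.take n).head? = l.head? := by
  cases l <;> cases n <;> simp_all

theorem getLast?_replicate_pos (k : Nat) (h : 0 < k) :
    (List.replicate k '.').getLast? = some '.' := by
  cases k with
  | zero => omega
  | succ m => simp [List.getLast?_replicate]

-- the candidate property is exactly "a dot-stripped proper prefix"
theorem okL_iff_strip (sl cl : List Char) :
    okL sl cl ↔ ∃ n : Nat, 1 ≤ n ∧ n < cl.length ∧ sl = pvRstripDot (cl.take n) := by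
  constructor
  · intro hok
    rcases eq_or_ne sl [] with he | he
    · obtain ⟨hlen, hhd⟩ := hok.2.2.2 he
      refine ⟨1, le_refl _, by omega, ?_⟩
      cases cl with
      | nil => simp at hhd
      | cons a t =>
        have ha : a = '.' := by simpa using hhd
        subst ha
        rw [he]
        simp [pvRstripDot, List.dropWhile]
    · refine ⟨sl.length, List.length_pos_of_ne_nil he, hok.2.1, ?_⟩
      rw [← List.prefix_iff_eq_take.mp hok.1, pvRstripDot_eq_self hok.2.2.1]
  · rintro ⟨n, hn1, hn2, rfl⟩
    obtain ⟨k, hk⟩ := pvRstripDot_spec (cl.take n)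
    have hpre : pvRstripDot (cl.take n) <+: cl.take n := ⟨List.replicate k '.', hk.symm⟩
    have hlent : (cl.take n).length = n := by
      rw [List.length_take]
      omega
    have hlen : (pvRstripDot (cl.take n)).length ≤ n := by
      have := hpre.length_le
      omega
    refine ⟨hpre.trans (List.take_prefix n cl), by omega, pvRstripDot_getLast? _, ?_⟩
    intro hnil
    rw [hnil] at hk
    simp only [List.nil_append] at hk
    have hkn : k = n := by
      have := congrArg List.length hk
      simpa [hlent] using this.symm
    refine ⟨by omega, ?_⟩
    rw [← head?_take_pos cl n (by omega), hk, hkn]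
    cases n with
    | zero => omega
    | succ m => rw [List.replicate_succ]; rfl

-- the freshly produced candidate of A's loop is the longest okL candidate of cl
theorem cand_okL {cl : List Char} (h : 1 < cl.length) : okL (pvRstripDot cl.dropLast) cl := by
  rw [okL_iff_strip]
  exact ⟨cl.length - 1, by omega, by omega, by rw [List.dropLast_eq_take]⟩

theorem cand_max {cl sl : List Char} (h : 1 < cl.length) (hok : okL sl cl) :
    sl.length ≤ (pvRstripDot cl.dropLast).length := by
  set r := pvRstripDot cl.dropLast with hr
  obtain ⟨k, hk⟩ := pvRstripDot_spec cl.dropLast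
  rw [← hr] at hk
  by_contra hgt
  rw [not_le] at hgt
  have hsl_take : sl = cl.take sl.length := List.prefix_iff_eq_take.mp hok.1
  have hlen : sl.length ≤ cl.dropLast.length := by
    have := hok.2.1
    rw [List.length_dropLast]
    omega
  have hpre : sl = cl.dropLast.take sl.length := by
    rw [List.dropLast_eq_take, List.take_take, Nat.min_eq_left (by rw [List.length_dropLast] at hlen; omega)]
    exact hsl_take
  have hklen : cl.dropLast.length = r.length + k := by
    have := congrArg List.length hk
    simpa using this
  have hsplit : sl = r ++ List.replicate (sl.length - r.length) '.' := by
    rw [hpre, hk, List.take_append,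
      List.take_of_length_le (by omega), List.take_replicate,
      Nat.min_eq_left (by omega)]
    simp
  have hlast : sl.getLast? = some '.' := by
    rw [hsplit, List.getLast?_append_of_ne_nil]
    · exact getLast?_replicate_pos _ (by omega)
    · simp [List.replicate_eq_nil_iff]
      omega
  exact hok.2.2.1 hlast

-- recursion transfer: candidates of cl other than cand' are exactly the candidates of cand'
theorem okL_step {cl sl : List Char} (h : 1 < cl.length) (hne : sl ≠ pvRstripDot cl.dropLast) :
    (okL sl cl ↔ okL sl (pvRstripDot cl.dropLast)) := by
  set cand := pvRstripDot cl.dropLast with hcand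
  have hcok := cand_okL h
  rw [← hcand] at hcok
  have hcand_take : cand = cl.take cand.length := List.prefix_iff_eq_take.mp hcok.1
  constructor
  · intro hok
    have hlt : sl.length < cand.length := by
      have hle := cand_max h hok
      rw [← hcand] at hle
      rcases Nat.lt_or_ge sl.length cand.length with h' | h'
      · exact h'
      · exact absurd (okL_unique hok hcok (by omega)) hne
    have hsl_take : sl = cl.take sl.length := List.prefix_iff_eq_take.mp hok.1
    have hpre : sl <+: cand := by
      rw [List.prefix_iff_eq_take, hcand_take, List.take_take,
        Nat.min_eq_left (le_of_lt hlt)]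
      exact hsl_take
    refine ⟨hpre, hlt, hok.2.2.1, ?_⟩
    intro hnil
    obtain ⟨hn, hhd⟩ := hok.2.2.2 hnil
    have hc0 : cand ≠ [] := fun hc => hne (hnil.trans hc.symm)
    have hm : 1 < cand.length := by
      rcases Nat.lt_or_ge 1 cand.length with h' | h'
      · exact h'
      · exfalso
        have h1 : cand.length = 1 := by
          have := List.length_pos_of_ne_nil hc0
          omega
        have : cand.getLast? = some '.' := by
          rw [hcand_take, h1]
          cases cl with
          | nil => simp at h
          | cons a t =>
            have ha : a = '.' := by simpa using hhd
            simp [ha]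
        exact hcok.2.2.1 this
    refine ⟨hm, ?_⟩
    rw [hcand_take, head?_take_pos _ _ (by omega)]
    exact hhd
  · intro hok
    refine ⟨hok.1.trans hcok.1, lt_trans hok.2.1 hcok.2.1, hok.2.2.1, ?_⟩
    intro hnil
    obtain ⟨hm, hhd⟩ := hok.2.2.2 hnil
    refine ⟨h, ?_⟩
    rw [hcand_take, head?_take_pos _ _ (by omega)] at hhd
    exact hhd

-- full characterisation of A's loop
def Aok (codes : List String) (cl : List Char) (r : Option (List Char)) : Prop :=
  match r with
  | some p => String.ofList p ∈ codes ∧ okL p cl ∧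
      ∀ s ∈ codes, okL s.toList cl → s.toList.length ≤ p.length
  | none => ∀ s ∈ codes, ¬ okL s.toList cl

theorem pvNearest_spec (codes : List String) (cl : List Char) :
    Aok codes cl (pvNearest (PySem.Set.ofList codes) cl) := by
  induction hn : cl.length using Nat.strong_induction_on generalizing cl with
  | _ n ih =>
  subst hn
  rw [pvNearest]
  by_cases h : 1 < cl.length
  · rw [dif_pos h]
    set cand := pvRstripDot cl.dropLast with hcand
    have hcok := cand_okL h
    rw [← hcand] at hcok
    by_cases hmem : PySem.Set.contains (PySem.Set.ofList codes) (String.ofList cand) = true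
    · rw [if_pos hmem]
      simp only [Aok]
      refine ⟨by simpa [PySem.Set.contains] using hmem, hcok, ?_⟩
      intro s hs hok
      have := cand_max h hok
      rwa [← hcand] at this
    · rw [if_neg hmem]
      have hrec := ih cand.length hcok.2.1 cand rfl
      cases hres : pvNearest (PySem.Set.ofList codes) cand with
      | some p =>
        rw [hres] at hrec
        simp only [Aok] at hrec ⊢
        obtain ⟨hp1, hp2, hp3⟩ := hrec
        have hpne : p ≠ cand := by
          intro he
          have := hp2.2.1
          rw [he] at this
          omega
        refine ⟨hp1, (okL_step h hpne).mpr hp2, ?_⟩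
        intro s hs hok
        by_cases hsc : s.toList = cand
        · exfalso
          apply hmem
          have heq : String.ofList cand = s := by rw [← hsc, String.ofList_toList]
          rw [heq]
          simpa [PySem.Set.contains] using hs
        · exact hp3 s hs ((okL_step h hsc).mp hok)
      | none =>
        rw [hres] at hrec
        simp only [Aok] at hrec ⊢
        intro s hs hok
        by_cases hsc : s.toList = cand
        · apply hmem
          have heq : String.ofList cand = s := by rw [← hsc, String.ofList_toList]
          rw [heq]
          simpa [PySem.Set.contains] using hs
        · exact hrec s hs ((okL_step h hsc).mp hok)
  · rw [dif_neg h]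
    simp only [Aok]
    intro s hs hok
    have h1 := hok.2.1
    rcases eq_or_ne s.toList [] with he | he
    · obtain ⟨h2, _⟩ := hok.2.2.2 he
      omega
    · have := List.length_pos_of_ne_nil he
      omega

-- B side: membership in the comprehension is exactly the candidate property
theorem mem_candidates (c q : String) :
    (q ∈ (PySem.List.pyRange 1 (PySem.Str.len c) 1).map
        (fun i => String.ofList (pvRstripDot (PySem.List.slice c.toList none (some i)))))
      ↔ okL q.toList c.toList := by
  rw [List.mem_map, okL_iff_strip]
  constructor
  · rintro ⟨i, hi, rfl⟩
    obtain ⟨hi1, hi2⟩ := PySem.List.mem_pyRange_one.mp hi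
    rw [str_len_eq] at hi2
    have hic : i = ((i.toNat : Nat) : Int) := by omega
    refine ⟨i.toNat, by omega, by omega, ?_⟩
    rw [hic, PySem.List.slice_to_natCast, String.toList_ofList, Int.toNat_natCast]
  · rintro ⟨n, hn1, hn2, hq⟩
    refine ⟨(n : Int), PySem.List.mem_pyRange_one.mpr ⟨by omega, by rw [str_len_eq]; exact_mod_cast hn2⟩, ?_⟩
    rw [PySem.List.slice_to_natCast, ← hq, String.ofList_toList]

theorem mem_Set_ofList_contains {xs : List String} {y : String} :
    PySem.Set.contains (PySem.Set.ofList xs) y = true ↔ y ∈ xs := by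
  constructor
  · intro h; simpa [PySem.Set.contains] using h
  · intro h; simpa [PySem.Set.contains] using h

-- max? basics (max? is a foldl keeping the first maximal element)
theorem max?_mem {α κ : Type} [LT κ] [DecidableLT κ] (xs : List α) (key : α → κ) (m : α)
    (h : PySem.List.max? xs key = some m) : m ∈ xs := by
  unfold PySem.List.max? at h
  have gen : ∀ (l : List α) (acc : Option α),
      l.foldl (fun acc x => match acc with
        | none => some x
        | some a => if key a < key x then some x else some a) acc = some m →
      m ∈ l ∨ acc = some m := by
    intro l
    induction l with
    | nil => intro acc h; exact Or.inr h
    | cons a t ih =>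
      intro acc h
      rw [List.foldl_cons] at h
      rcases ih _ h with hm | hm
      · exact Or.inl (List.mem_cons_of_mem a hm)
      · cases acc with
        | none =>
          simp only at hm
          cases hm
          exact Or.inl List.mem_cons_self
        | some b =>
          simp only at hm
          split_ifs at hm
          · cases hm; exact Or.inl List.mem_cons_self
          · exact Or.inr hm
  rcases gen xs none h with hm | hm
  · exact hm
  · exact absurd hm (by simp)

theorem max?_isSome {α κ : Type} [LT κ] [DecidableLT κ] (xs : List α) (key : α → κ)
    (h : xs ≠ []) : (PySem.List.max? xs key).isSome := by
  unfold PySem.List.max?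
  have gen : ∀ (l : List α) (acc : Option α), acc.isSome →
      (l.foldl (fun acc x => match acc with
        | none => some x
        | some a => if key a < key x then some x else some a) acc).isSome := by
    intro l
    induction l with
    | nil => intro acc h; exact h
    | cons a t ih =>
      intro acc hacc
      rw [List.foldl_cons]
      cases acc with
      | none => exact ih _ (by simp)
      | some b =>
        apply ih
        simp only
        split_ifs <;> simp
  cases xs with
  | nil => exact absurd rfl h
  | cons a t =>
    rw [List.foldl_cons]
    exact gen t _ (by simp)

-- the per-code agreement: A's loop result equals B's filtered argmax
theorem nearest_eq_max (codes : List String) (c : String) :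
    Option.map String.ofList (pvNearest (PySem.Set.ofList codes) c.toList)
      = PySem.List.max?
          (((PySem.List.pyRange 1 (PySem.Str.len c) 1).map
            (fun i => String.ofList (pvRstripDot (PySem.List.slice c.toList none (some i))))).filter
            (fun p => PySem.Set.contains (PySem.Set.ofList codes) p))
          (fun p => PySem.Str.len p) := by
  set parents := (((PySem.List.pyRange 1 (PySem.Str.len c) 1).map
      (fun i => String.ofList (pvRstripDot (PySem.List.slice c.toList none (some i))))).filter
      (fun p => PySem.Set.contains (PySem.Set.ofList codes) p)) with hparents
  have hmemP : ∀ q, q ∈ parents ↔ (okL q.toList c.toList ∧ q ∈ codes) := by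
    intro q
    rw [hparents, List.mem_filter, mem_candidates, mem_Set_ofList_contains]
  have hA := pvNearest_spec codes c.toList
  cases hres : pvNearest (PySem.Set.ofList codes) c.toList with
  | none =>
    rw [hres] at hA
    simp only [Aok] at hA
    have hnil : parents = [] := by
      rw [List.eq_nil_iff_forall_not_mem]
      intro q hq
      obtain ⟨hok, hmem⟩ := (hmemP q).mp hq
      exact hA q hmem hok
    rw [hnil]
    rfl
  | some p =>
    rw [hres] at hA
    simp only [Aok] at hA
    obtain ⟨hp1, hp2, hp3⟩ := hA
    have hpP : String.ofList p ∈ parents := by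
      rw [hmemP]
      exact ⟨by simpa [String.toList_ofList] using hp2, hp1⟩
    have hne : parents ≠ [] := fun h => by rw [h] at hpP; simp at hpP
    obtain ⟨m, hm⟩ := Option.isSome_iff_exists.mp (max?_isSome parents (fun p => PySem.Str.len p) hne)
    rw [hm]
    obtain ⟨hmok, hmmem⟩ := (hmemP m).mp (max?_mem parents _ m hm)
    have h1 : m.toList.length ≤ p.length := hp3 m hmmem hmok
    have h2 : p.length ≤ m.toList.length := by
      have := PySem.List.max?_isMax hm (String.ofList p) hpP
      rw [str_len_eq, str_len_eq, String.toList_ofList] at this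
      exact_mod_cast this
    have : p = m.toList := okL_unique hp2 hmok (by omega)
    simp only [Option.map_some]
    rw [this, String.ofList_toList]

-- ===== VERDICT (by name: the statement is the Claim_ definition above) =====
theorem guess_parents_spec : Claim_equal_guess_parents := by
  intro codes _
  unfold Spec_guess_parents guess_parents guess_parents_alt
  have hstep : ∀ (edges : List (String × String)) (c : String),
      (match pvNearest (PySem.Set.ofList codes) c.toList with
       | some p => edges ++ [(String.ofList p, c)]
       | none => edges)
      = (match PySem.List.max?
            (((PySem.List.pyRange 1 (PySem.Str.len c) 1).map
              (fun i => String.ofList (pvRstripDot (PySem.List.slice c.toList none (some i))))).filter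
              (fun p => PySem.Set.contains (PySem.Set.ofList codes) p))
            (fun p => PySem.Str.len p) with
         | some p => edges ++ [(p, c)]
         | none => edges) := by
    intro edges c
    rw [← nearest_eq_max codes c]
    cases pvNearest (PySem.Set.ofList codes) c.toList <;> simp
  simp only [hstep]
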